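-- pv_equiv track=rewrite | github.com/nilmtk/nilmtk | scripts/plots_for_e_energy_2014/top_k_appliances_comparison.py | pretty_name_appliance_names
-- ===== SOURCE A (Python) =====
-- def pretty_name_appliance_names(appliance_name_list):
--     names = [name.replace('_', ' ')  for name in appliance_name_list]
--     names = [name[0].upper() + name[1:] for name in names]
--     for old, new in [('Htpc', 'Home theatre PC'),
--                      ('Boiler', 'Gas boiler'),
--                      ('Air conditioner', 'Air conditioning')]:
--         try:
--             names[names.index(old)] = new
--         except ValueError:
--             pass
--     return names
-- ===== SOURCE B (Python) =====
-- def pretty_name_appliance_names(appliance_name_list):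
--     replacements = {'Htpc': 'Home theatre PC',
--                     'Boiler': 'Gas boiler',
--                     'Air conditioner': 'Air conditioning'}
--     result = []
--     for name in appliance_name_list:
--         pretty = name.replace('_', ' ')
--         pretty = pretty[0].upper() + pretty[1:]
--         if pretty in replacements:
--             pretty = replacements.pop(pretty)
--         result.append(pretty)
--     return result
-- ===== Notes on version B (the rewrite author's own statement) =====
-- stated objective: simpler
-- what changed: A builds the prettified list and then re-scans it with names.index inside a try/except for each of the three special names; B makes a single pass over the input with a consume-once replacements dict (pop), relabelling each special name at its first occurrence only.
import Mathlib
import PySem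

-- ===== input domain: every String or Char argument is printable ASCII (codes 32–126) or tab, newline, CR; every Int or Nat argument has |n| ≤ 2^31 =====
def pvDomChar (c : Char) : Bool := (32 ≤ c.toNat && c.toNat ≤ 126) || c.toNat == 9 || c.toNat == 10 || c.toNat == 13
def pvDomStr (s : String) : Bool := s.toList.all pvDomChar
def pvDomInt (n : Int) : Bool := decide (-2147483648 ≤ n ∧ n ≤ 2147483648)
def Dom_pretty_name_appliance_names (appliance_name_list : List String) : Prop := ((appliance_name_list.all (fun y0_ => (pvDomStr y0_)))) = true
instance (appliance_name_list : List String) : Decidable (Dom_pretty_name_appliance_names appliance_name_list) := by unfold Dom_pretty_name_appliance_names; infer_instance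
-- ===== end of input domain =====

-- B replaces A's build-then-rescan (three names.index passes in try/except) by a single pass
-- with a consume-once replacements dict; objective: simpler. Equivalence is proved on lists of
-- nonempty strings (Pre_): on an empty string A raises IndexError at name[0].


-- ===== PORT A =====
-- name[0].upper() + name[1:]  (Python raises IndexError on ""; those inputs are outside Pre_)
def pvCapitalize (s : String) : String :=
  match PySem.Str.pyGet? s 0 with
  | some c => String.ofList (PySem.Chars.upperChar c :: PySem.List.slice s.toList (some 1) none)
  | none => ""

def pretty_name_appliance_names (appliance_name_list : List String) : List String :=
  -- names = [name.replace('_',' ') ...] ; names = [name[0].upper() + name[1:] ...]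
  let names := (appliance_name_list.map (fun name => PySem.Str.replace name "_" " ")).map
    (fun name => pvCapitalize name)
  [("Htpc", "Home theatre PC"), ("Boiler", "Gas boiler"), ("Air conditioner", "Air conditioning")].foldl
    (fun ns (p : String × String) =>
      match PySem.List.index? ns p.1 with     -- try: names[names.index(old)] = new  except ValueError: pass
      | some i => ns.set i p.2
      | none => ns) names

-- ===== PORT B =====
def pretty_name_appliance_names_alt (appliance_name_list : List String) : List String :=
  let replacements : PySem.Dict String String :=
    PySem.Dict.ofList [("Htpc", "Home theatre PC"), ("Boiler", "Gas boiler"), ("Air conditioner", "Air conditioning")]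
  (appliance_name_list.foldl
    (fun (acc : List String × PySem.Dict String String) name =>
      let pretty := pvCapitalize (PySem.Str.replace name "_" " ")
      match acc.2.get? pretty with            -- if pretty in replacements: pretty = replacements.pop(pretty)
      | some v => (acc.1 ++ [v], acc.2.erase pretty)
      | none => (acc.1 ++ [pretty], acc.2)) ([], replacements)).1

-- ===== PRECONDITION & SPEC =====
-- Pre_ excludes lists containing the empty string: there Python A raises IndexError at name[0] (and so does B).
def Pre_pretty_name_appliance_names (appliance_name_list : List String) : Prop :=
  ∀ s ∈ appliance_name_list, s ≠ ""
instance (appliance_name_list : List String) : Decidable (Pre_pretty_name_appliance_names appliance_name_list) := by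
  unfold Pre_pretty_name_appliance_names; infer_instance
def pvWitness_pretty_name_appliance_names : List String := ["boiler", "htpc", "air_conditioner", "fridge"]

def Spec_pretty_name_appliance_names (appliance_name_list : List String) (out : List String) : Prop := out = pretty_name_appliance_names_alt appliance_name_list
instance (appliance_name_list : List String) (out : List String) : Decidable (Spec_pretty_name_appliance_names appliance_name_list out) := by unfold Spec_pretty_name_appliance_names; infer_instance

-- ===== CLAIM (what is proved, stated in full; the proofs are below) =====
def Claim_equal_pretty_name_appliance_names : Prop := ∀ (appliance_name_list : List String), Dom_pretty_name_appliance_names appliance_name_list → Pre_pretty_name_appliance_names appliance_name_list → Spec_pretty_name_appliance_names appliance_name_list (pretty_name_appliance_names appliance_name_list)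

-- ===== LEMMAS AND PROOFS =====

-- the step A's replacement loop performs on the names list
def pvStep (ns : List String) (p : String × String) : List String :=
  match PySem.List.index? ns p.1 with
  | some i => ns.set i p.2
  | none => ns

-- B's consume-once pass, expressed on the dict's items list
def pvGo : List (String × String) → List String → List String
  | _, [] => []
  | ps, n :: t =>
    match (ps.find? (fun p => p.1 == n)).map Prod.snd with
    | some v => v :: pvGo (ps.filter (fun p => !(p.1 == n))) t
    | none => n :: pvGo ps t
  termination_by _ ns => ns.length

lemma pvStep_nil (p : String × String) : pvStep [] p = [] := by
  simp [pvStep, PySem.List.index?]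

lemma foldl_pvStep_nil (ps : List (String × String)) : ps.foldl pvStep [] = [] := by
  induction ps with
  | nil => rfl
  | cons p ps ih => rw [List.foldl_cons, pvStep_nil]; exact ih

lemma pvStep_cons_of_ne (n : String) (t : List String) (p : String × String) (h : p.1 ≠ n) :
    pvStep (n :: t) p = n :: pvStep t p := by
  unfold pvStep
  have hidx : PySem.List.index? (n :: t) p.1 = (PySem.List.index? t p.1).map (· + 1) :=
    PySem.List.index?_cons_of_ne t (Ne.symm h)
  rw [hidx]
  cases PySem.List.index? t p.1 with
  | none => rfl
  | some i => simp

lemma foldl_pvStep_cons_of_ne (ps : List (String × String)) (n : String) (t : List String)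
    (h : ∀ p ∈ ps, p.1 ≠ n) :
    ps.foldl pvStep (n :: t) = n :: ps.foldl pvStep t := by
  induction ps generalizing t with
  | nil => rfl
  | cons p ps ih =>
    rw [List.foldl_cons, List.foldl_cons,
        pvStep_cons_of_ne n t p (h p (List.mem_cons_self ..))]
    exact ih (pvStep t p) (fun q hq => h q (List.mem_cons_of_mem _ hq))

lemma foldl_pvStep_eq_pvGo (ns : List String) (ps : List (String × String))
    (hkeys : (ps.map Prod.fst).Nodup)
    (hvk : ∀ p ∈ ps, ∀ q ∈ ps, p.2 ≠ q.1) :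
    ps.foldl pvStep ns = pvGo ps ns := by
  induction ns generalizing ps with
  | nil => rw [pvGo, foldl_pvStep_nil]
  | cons n t ih =>
    cases hf : ps.find? (fun p => p.1 == n) with
    | none =>
      have hne : ∀ p ∈ ps, p.1 ≠ n := by
        intro p hp
        have := List.find?_eq_none.mp hf p hp
        simpa using this
      rw [pvGo, hf, foldl_pvStep_cons_of_ne ps n t hne]
      simp only [Option.map_none]
      exact congrArg (n :: ·) (ih ps hkeys hvk)
    | some pv =>
      obtain ⟨hpred, l1, l2, hsplit, hbefore⟩ := List.find?_eq_some_iff_append.mp hf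
      obtain ⟨k, v⟩ := pv
      have hk : k = n := by simpa using hpred
      subst hk
      have hl1 : ∀ p ∈ l1, p.1 ≠ k := by
        intro p hp
        have := hbefore p hp
        simpa using this
      have hnd : (l1.map Prod.fst ++ k :: l2.map Prod.fst).Nodup := by
        have h0 := hkeys
        rw [hsplit] at h0
        simpa using h0
      -- the key k appears nowhere in l2 (keys are nodup)
      have hknotl2 : k ∉ l2.map Prod.fst := (List.nodup_cons.mp hnd.of_append_right).1
      have hl2 : ∀ p ∈ l2, p.1 ≠ k := by
        intro p hp he
        exact hknotl2 (by rw [← he]; exact List.mem_map_of_mem hp)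
      -- the matched pair's value is never a key
      have hvnotkey : ∀ p ∈ l2, p.1 ≠ v := by
        intro p hp
        have hmem : (k, v) ∈ ps := hsplit ▸ List.mem_append_right _ (List.mem_cons_self ..)
        have hq : p ∈ ps := hsplit ▸ List.mem_append_right _ (List.mem_cons_of_mem _ hp)
        exact fun he => hvk (k, v) hmem p hq he.symm
      -- filter removes exactly the matched pair
      have hfilter : ps.filter (fun p => !(p.1 == k)) = l1 ++ l2 := by
        rw [hsplit, List.filter_append, List.filter_cons]
        have hc : (!(((k, v) : String × String).1 == k)) = false := by simp
        rw [hc]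
        simp only [Bool.false_eq_true, if_false]
        rw [List.filter_eq_self.mpr (fun p hp => by simpa using hl1 p hp),
            List.filter_eq_self.mpr (fun p hp => by simpa using hl2 p hp)]
      -- evaluate A's fold along the split
      have hA : ps.foldl pvStep (k :: t) = v :: (l1 ++ l2).foldl pvStep t := by
        rw [hsplit, List.foldl_append, foldl_pvStep_cons_of_ne l1 k t hl1, List.foldl_cons]
        have hstep : pvStep (k :: l1.foldl pvStep t) (k, v) = v :: l1.foldl pvStep t := by
          unfold pvStep
          rw [PySem.List.index?_cons_self]
          rfl
        rw [hstep, foldl_pvStep_cons_of_ne l2 v (l1.foldl pvStep t) hvnotkey, List.foldl_append]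
      -- induction hypothesis conditions for l1 ++ l2
      have hsub : ∀ p ∈ l1 ++ l2, p ∈ ps := by
        intro p hp
        rcases List.mem_append.mp hp with h | h
        · exact hsplit ▸ List.mem_append_left _ h
        · exact hsplit ▸ List.mem_append_right _ (List.mem_cons_of_mem _ h)
      have hkeys' : ((l1 ++ l2).map Prod.fst).Nodup := by
        rw [List.map_append]
        exact (((List.sublist_cons_self k (l2.map Prod.fst)).append_left (l1.map Prod.fst))).nodup hnd
      have hvk' : ∀ p ∈ l1 ++ l2, ∀ q ∈ l1 ++ l2, p.2 ≠ q.1 :=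
        fun p hp q hq => hvk p (hsub p hp) q (hsub q hq)
      rw [pvGo, hf, hA, hfilter]
      exact congrArg (v :: ·) (ih (l1 ++ l2) hkeys' hvk')

-- B's fold with its list-and-dict accumulator, characterised by pvGo
lemma alt_foldl (xs : List String) (acc : List String) (d : PySem.Dict String String) :
    (xs.foldl
      (fun (acc : List String × PySem.Dict String String) name =>
        let pretty := pvCapitalize (PySem.Str.replace name "_" " ")
        match acc.2.get? pretty with
        | some v => (acc.1 ++ [v], acc.2.erase pretty)
        | none => (acc.1 ++ [pretty], acc.2)) (acc, d)).1
    = acc ++ pvGo d.items (xs.map (fun n => pvCapitalize (PySem.Str.replace n "_" " "))) := by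
  induction xs generalizing acc d with
  | nil => simp [pvGo]
  | cons x xs ih =>
    rw [List.foldl_cons, List.map_cons, pvGo]
    have hget : (d.items.find? (fun p => p.1 == pvCapitalize (PySem.Str.replace x "_" " "))).map Prod.snd
        = d.get? (pvCapitalize (PySem.Str.replace x "_" " ")) := rfl
    rw [hget]
    cases hg : d.get? (pvCapitalize (PySem.Str.replace x "_" " ")) with
    | none =>
      simp only [hg]
      rw [ih]
      simp
    | some v =>
      simp only [hg]
      rw [ih]
      simp [PySem.Dict.erase]

-- ===== VERDICT (by name: the statement is the Claim_ definition above) =====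
theorem pretty_name_appliance_names_spec : Claim_equal_pretty_name_appliance_names := by
  intro xs _ _
  unfold Spec_pretty_name_appliance_names pretty_name_appliance_names pretty_name_appliance_names_alt
  rw [alt_foldl xs [] _, List.nil_append, List.map_map]
  have hitems : (PySem.Dict.ofList
      [("Htpc", "Home theatre PC"), ("Boiler", "Gas boiler"), ("Air conditioner", "Air conditioning")]).items
      = [("Htpc", "Home theatre PC"), ("Boiler", "Gas boiler"), ("Air conditioner", "Air conditioning")] := by
    decide
  rw [hitems,
      show (fun ns (p : String × String) =>
        match PySem.List.index? ns p.1 with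
        | some i => ns.set i p.2
        | none => ns) = pvStep from rfl]
  show List.foldl pvStep (xs.map (fun n => pvCapitalize (PySem.Str.replace n "_" " ")))
      [("Htpc", "Home theatre PC"), ("Boiler", "Gas boiler"), ("Air conditioner", "Air conditioning")]
    = pvGo [("Htpc", "Home theatre PC"), ("Boiler", "Gas boiler"), ("Air conditioner", "Air conditioning")]
      (xs.map (fun n => pvCapitalize (PySem.Str.replace n "_" " ")))
  exact (foldl_pvStep_eq_pvGo
    (xs.map (fun n => pvCapitalize (PySem.Str.replace n "_" " ")))
    [("Htpc", "Home theatre PC"), ("Boiler", "Gas boiler"), ("Air conditioner", "Air conditioning")]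
    (by decide) (by decide))
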